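-- pv_equiv track=rewrite | github.com/itdojp/ITDO_ERP2 | backend/app/services/permission_matrix.py | _check_wildcard_permissions
-- ===== SOURCE A (Python) =====
-- from typing import Any, Dict, Optional, Set, Union
--
-- def _check_wildcard_permissions(
--     permissions: Set[str], permission: str
-- ) -> bool:
--     """Check if any wildcard permissions match the requested permission."""
--     for perm in permissions:
--         if perm.endswith("*"):
--             prefix = perm[:-1]
--             if permission.startswith(prefix):
--                 return True
--         elif perm == "*":
--             return True
--
--     return False
-- ===== SOURCE B (Python) =====
-- def _check_wildcard_permissions(permissions, permission):
--     """Hash-based: test prefixes of `permission` (up to the longest stored permission) with '*' appended for set membership."""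
--     maxlen = 0
--     for p in permissions:
--         maxlen = max(maxlen, len(p))
--     limit = min(len(permission), maxlen - 1)
--     return any(permission[:i] + "*" in permissions for i in range(limit + 1))
-- ===== Notes on version B (the rewrite author's own statement) =====
-- stated objective: alternative
-- what changed: Instead of scanning every stored permission and prefix-testing it against the request, B computes the longest stored permission length once and tests each prefix of the request (up to that cap) with '*' appended for hashed set membership.
import Mathlib
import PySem

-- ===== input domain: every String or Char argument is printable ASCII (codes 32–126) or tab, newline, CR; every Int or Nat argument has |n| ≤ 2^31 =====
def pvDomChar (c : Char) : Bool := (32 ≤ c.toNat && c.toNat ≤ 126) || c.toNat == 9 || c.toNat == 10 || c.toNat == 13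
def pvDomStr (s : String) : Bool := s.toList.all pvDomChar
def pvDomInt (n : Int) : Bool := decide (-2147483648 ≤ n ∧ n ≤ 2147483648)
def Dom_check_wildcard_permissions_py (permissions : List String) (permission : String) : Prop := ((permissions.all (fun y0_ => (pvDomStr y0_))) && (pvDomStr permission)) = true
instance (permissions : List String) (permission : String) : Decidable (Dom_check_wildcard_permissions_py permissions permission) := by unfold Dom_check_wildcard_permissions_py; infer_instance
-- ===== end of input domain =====

-- B re-implements the wildcard check by membership-testing prefix+'*' candidates (capped at the longest stored permission) instead of scanning all stored permissions; alternative algorithm, speed not claimed.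

-- ===== PORT A =====
-- 'for perm in permissions: …' — straight recursion over the set's elements, branches in source order
def pvA_loop (permission : String) : List String → Bool
  | [] => false
  | perm :: rest =>
    if PySem.Str.endswith perm "*" then
      if PySem.Str.startswith permission (PySem.Str.slice perm none (some (-1))) then true
      else pvA_loop permission rest
    else if perm == "*" then true
    else pvA_loop permission rest

def check_wildcard_permissions_py (permissions : List String) (permission : String) : Bool :=
  pvA_loop permission permissions

-- ===== PORT B =====
-- 'maxlen = 0; for p in permissions: maxlen = max(maxlen, len(p))'
def pvMaxLen (permissions : List String) : Int :=
  permissions.foldl (fun acc p => max acc (PySem.Str.len p : Int)) 0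

-- limit = min(len(permission), maxlen - 1); any(permission[:i] + "*" in permissions for i in range(limit + 1))
def check_wildcard_permissions_py_alt (permissions : List String) (permission : String) : Bool :=
  let limit : Int := min (PySem.Str.len permission : Int) (pvMaxLen permissions - 1)
  (PySem.List.pyRange 0 (limit + 1) 1).any
    (fun i => permissions.contains (PySem.Str.slice permission none (some i) ++ "*"))

-- ===== PRECONDITION & SPEC =====
def Spec_check_wildcard_permissions_py (permissions : List String) (permission : String) (out : Bool) : Prop := out = check_wildcard_permissions_py_alt permissions permission
instance (permissions : List String) (permission : String) (out : Bool) : Decidable (Spec_check_wildcard_permissions_py permissions permission out) := by unfold Spec_check_wildcard_permissions_py; infer_instance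

-- ===== CLAIM (what is proved, stated in full; the proofs are below) =====
def Claim_equal_check_wildcard_permissions_py : Prop := ∀ (permissions : List String) (permission : String), Dom_check_wildcard_permissions_py permissions permission → Spec_check_wildcard_permissions_py permissions permission (check_wildcard_permissions_py permissions permission)

-- ===== LEMMAS AND PROOFS =====

-- perm.endswith("*") in chars
theorem pv_endswith_iff (perm : String) :
    PySem.Str.endswith perm "*" = true ↔ ['*'] <:+ perm.toList := by
  simp [PySem.Chars.endswith_iff]

-- permission.startswith(perm[:-1]) in chars
theorem pv_startswith_iff (permission perm : String) :
    PySem.Str.startswith permission (PySem.Str.slice perm none (some (-1))) = true ↔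
      perm.toList.dropLast <+: permission.toList := by
  simp [PySem.List.slice_to_neg_one, PySem.Chars.startswith_iff]

-- A's loop returns true iff some stored permission ends in '*' and its stem is a prefix of the request.
theorem pvA_loop_iff (permission : String) (l : List String) :
    pvA_loop permission l = true ↔
      ∃ p ∈ l, ['*'] <:+ p.toList ∧ p.toList.dropLast <+: permission.toList := by
  induction l with
  | nil => simp [pvA_loop]
  | cons perm rest ih =>
    by_cases h1 : PySem.Str.endswith perm "*" = true
    · by_cases h2 : PySem.Str.startswith permission (PySem.Str.slice perm none (some (-1))) = true
      · have h1' := (pv_endswith_iff perm).mp h1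
        have h2' := (pv_startswith_iff permission perm).mp h2
        simp only [pvA_loop, h1, h2, if_true]
        exact iff_of_true trivial ⟨perm, List.mem_cons_self, h1', h2'⟩
      · simp only [pvA_loop]
        rw [if_pos h1, if_neg h2, ih]
        constructor
        · rintro ⟨p, hp, hs⟩; exact ⟨p, List.mem_cons_of_mem _ hp, hs⟩
        · rintro ⟨p, hp, hs, hpre⟩
          rcases List.mem_cons.mp hp with rfl | hmem
          · exact absurd ((pv_startswith_iff permission p).mpr hpre) h2
          · exact ⟨p, hmem, hs, hpre⟩
    · have hne : ¬ ((perm == "*") = true) := by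
        intro h
        have : perm = "*" := eq_of_beq h
        subst this
        exact h1 (by decide)
      simp only [pvA_loop]
      rw [if_neg h1, if_neg hne, ih]
      constructor
      · rintro ⟨p, hp, hs⟩; exact ⟨p, List.mem_cons_of_mem _ hp, hs⟩
      · rintro ⟨p, hp, hs, hpre⟩
        rcases List.mem_cons.mp hp with rfl | hmem
        · exact absurd ((pv_endswith_iff p).mpr hs) h1
        · exact ⟨p, hmem, hs, hpre⟩

-- every stored permission's length is bounded by the running max B computes
theorem pv_len_le_maxLen (permissions : List String) (p : String) (hp : p ∈ permissions) :
    (PySem.Str.len p : Int) ≤ pvMaxLen permissions :=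
  (PySem.List.le_foldl_max_int permissions (fun q => (PySem.Str.len q : Int)) 0).2 p hp

-- B returns true iff some prefix of the request (within B's cap), with '*' appended, is among the stored permissions.
theorem pvB_iff (permissions : List String) (permission : String) :
    check_wildcard_permissions_py_alt permissions permission = true ↔
      ∃ k : Nat, k ≤ permission.toList.length ∧ (k : Int) ≤ pvMaxLen permissions - 1 ∧
        (∃ p ∈ permissions, p.toList = permission.toList.take k ++ ['*']) := by
  unfold check_wildcard_permissions_py_alt
  rw [List.any_eq_true]
  have hlen : (PySem.Str.len permission : Int) = permission.toList.length := by
    simp [PySem.Str.len_eq]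
  constructor
  · rintro ⟨i, hi, hc⟩
    rw [PySem.List.mem_pyRange_one] at hi
    obtain ⟨hi0, hilt⟩ := hi
    refine ⟨i.toNat, by omega, by omega, ?_⟩
    have hm : (PySem.Str.slice permission none (some i) ++ "*") ∈ permissions :=
      List.contains_iff_mem.mp hc
    refine ⟨_, hm, ?_⟩
    rw [String.toList_append]
    show _ ++ "*".toList = _
    have hsl : (PySem.Str.slice permission none (some i)).toList
        = permission.toList.take i.toNat := by
      simp [PySem.List.slice_to _ hi0]
    rw [hsl]
    rfl
  · rintro ⟨k, hk, hk2, p, hp, hps⟩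
    refine ⟨(k : Int), ?_, ?_⟩
    · rw [PySem.List.mem_pyRange_one]; omega
    · rw [List.contains_iff_mem]
      have heq : PySem.Str.slice permission none (some (k : Int)) ++ "*" = p := by
        apply String.toList_inj.mp
        rw [String.toList_append, hps]
        have hsl : (PySem.Str.slice permission none (some (k : Int))).toList
            = permission.toList.take ((k : Int)).toNat := by
          simp [PySem.List.slice_to _ (by positivity : (0:Int) ≤ (k:Int))]
        rw [hsl]
        simp
      rw [heq]; exact hp

-- Bridge: a stored permission ending in '*' whose stem prefixes the request IS exactly prefix+'*' for some prefix length k.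
theorem pv_bridge (permissions : List String) (permission : String) :
    (∃ p ∈ permissions, ['*'] <:+ p.toList ∧ p.toList.dropLast <+: permission.toList) ↔
      ∃ k : Nat, k ≤ permission.toList.length ∧ (k : Int) ≤ pvMaxLen permissions - 1 ∧
        (∃ p ∈ permissions, p.toList = permission.toList.take k ++ ['*']) := by
  constructor
  · rintro ⟨p, hp, ⟨q, hq⟩, hpre⟩
    have hdl : p.toList.dropLast = q := by rw [← hq]; simp
    rw [hdl] at hpre
    have hlenp : (PySem.Str.len p : Int) ≤ pvMaxLen permissions := pv_len_le_maxLen permissions p hp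
    have hlenp' : PySem.Str.len p = p.toList.length := by simp [PySem.Str.len_eq]
    have hql : p.toList.length = q.length + 1 := by rw [← hq]; simp
    refine ⟨q.length, hpre.length_le, by omega, p, hp, ?_⟩
    rw [← hq]
    congr 1
    exact List.prefix_iff_eq_take.mp hpre
  · rintro ⟨k, hk, _, p, hp, hps⟩
    refine ⟨p, hp, ⟨permission.toList.take k, hps.symm⟩, ?_⟩
    rw [hps]
    simp [List.take_prefix]

-- ===== VERDICT (by name: the statement is the Claim_ definition above) =====
theorem check_wildcard_permissions_py_spec : Claim_equal_check_wildcard_permissions_py := by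
  intro permissions permission _
  unfold Spec_check_wildcard_permissions_py
  rw [Bool.eq_iff_iff]
  rw [show check_wildcard_permissions_py permissions permission = pvA_loop permission permissions from rfl]
  rw [pvA_loop_iff, pvB_iff]
  exact pv_bridge permissions permission
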